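-- pv_equiv track=rewrite | github.com/flycatcher/relue-tcejorp | others/p011/src/main.py | hex_bitcount
-- ===== SOURCE A (Python) =====
-- import string
--
-- def count_bits(n):
--     result = 0
--     while n > 0:
--         result += (n & 1)
--         n = n >> 1
--     return result
--
-- def init_bitcount_dict():
--     result = dict()
--     for ch in string.hexdigits:
--         n = int(ch, 16)
--         result.setdefault(ch.upper(), count_bits(n))
--     return result
--
-- def hex_bitcount(text):
--     bitcount_dict = init_bitcount_dict()
--     result = 0
--     for ch in text.upper():
--         if ch in bitcount_dict:
--             result += bitcount_dict[ch]
--         else: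
--             return -1
--     return result
-- ===== SOURCE B (Python) =====
-- def _hexval(c):
--     if 48 <= c <= 57:
--         return c - 48
--     if 65 <= c <= 70 or 97 <= c <= 102:
--         return (c & 15) + 9
--     return None
--
--
-- def hex_bitcount(text):
--     n = 0
--     for ch in text:
--         d = _hexval(ord(ch))
--         if d is None:
--             return -1
--         n = 16 * n + d
--     return n.bit_count()
-- ===== Notes on version B (the rewrite author's own statement) =====
-- stated objective: alternative
-- what changed: A precomputes a per-hex-digit bit-count dictionary and sums table lookups over the uppercased string; B classifies each character by ord-arithmetic, accumulates the whole number with a Horner fold (n = 16*n + d) and returns one popcount of the final value, relying on nibble alignment.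
import Mathlib
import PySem

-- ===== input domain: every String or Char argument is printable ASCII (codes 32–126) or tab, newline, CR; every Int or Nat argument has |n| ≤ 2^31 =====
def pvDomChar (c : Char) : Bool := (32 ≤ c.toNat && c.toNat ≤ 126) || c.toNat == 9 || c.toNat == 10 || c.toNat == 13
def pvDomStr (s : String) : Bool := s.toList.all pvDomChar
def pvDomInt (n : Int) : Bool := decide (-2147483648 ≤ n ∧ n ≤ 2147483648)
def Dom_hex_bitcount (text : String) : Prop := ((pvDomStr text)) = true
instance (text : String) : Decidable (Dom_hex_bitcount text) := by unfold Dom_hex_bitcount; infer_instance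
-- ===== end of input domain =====

-- B replaces A's per-digit bit-count dictionary summation with an ord-arithmetic Horner
-- fold building the whole number, then a single popcount (objective: alternative).

-- ===== PORT A =====
-- while n > 0: result += n & 1; n = n >> 1   (fuel n.toNat only makes the loop total; same values)
def pvCountAux : Nat → Int → Int
  | 0, _ => 0
  | f + 1, n => if 0 < n then PySem.Int.band n 1 + pvCountAux f (n >>> 1) else 0

def count_bits (n : Int) : Int := pvCountAux n.toNat n

-- string.hexdigits = "0123456789abcdefABCDEF"; int(ch, 16) via ofStrBase? (never none here,
-- .getD 0 only totalises); setdefault k v = insert only if key absent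
def init_bitcount_dict : PySem.Dict Char Int :=
  ("0123456789abcdefABCDEF".toList).foldl
    (fun d ch =>
      let n := (PySem.Int.ofStrBase? (String.singleton ch) 16).getD 0
      let k := PySem.Chars.upperChar ch
      if d.contains k then d else d.insert k (count_bits n))
    PySem.Dict.empty

def pvALoop (d : PySem.Dict Char Int) : List Char → Int → Int
  | [], acc => acc
  | c :: cs, acc =>
    match d.get? c with
    | some v => pvALoop d cs (acc + v)
    | none => -1

def hex_bitcount (text : String) : Int :=
  pvALoop init_bitcount_dict (PySem.Str.upper text).toList 0

-- ===== PORT B =====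
def pvHexVal? (c : Int) : Option Int :=
  if 48 ≤ c ∧ c ≤ 57 then some (c - 48)
  else if (65 ≤ c ∧ c ≤ 70) ∨ (97 ≤ c ∧ c ≤ 102) then some (PySem.Int.band c 15 + 9)
  else none

def pvBLoop : List Char → Int → Int
  | [], n => (PySem.Int.bitCount n : Int)
  | c :: cs, n =>
    match pvHexVal? (c.toNat : Int) with
    | none => -1
    | some d => pvBLoop cs (16 * n + d)

def hex_bitcount_alt (text : String) : Int := pvBLoop text.toList 0

-- ===== PRECONDITION & SPEC =====
def Spec_hex_bitcount (text : String) (out : Int) : Prop := out = hex_bitcount_alt text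
instance (text : String) (out : Int) : Decidable (Spec_hex_bitcount text out) := by unfold Spec_hex_bitcount; infer_instance

-- ===== CLAIM (what is proved, stated in full; the proofs are below) =====
def Claim_equal_hex_bitcount : Prop := ∀ (text : String), Dom_hex_bitcount text → Spec_hex_bitcount text (hex_bitcount text)

-- ===== LEMMAS AND PROOFS =====

-- per-character agreement of the two lookups, as a decidable check on the code point
def pvCharOk (m : Nat) : Bool :=
  init_bitcount_dict.get? (PySem.Chars.upperChar (Char.ofNat m)) ==
    (pvHexVal? (m : Int)).map (fun d => (PySem.Int.bitCount d : Int))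
    && (pvHexVal? (m : Int)).all (fun d => decide (0 ≤ d ∧ d < 16))

set_option maxRecDepth 8192 in
theorem pvCharOk_all : ∀ m ∈ List.range 127, pvCharOk m = true := by decide

theorem pvCharOk_of_le (c : Char) (h : c.toNat ≤ 126) : pvCharOk c.toNat = true :=
  pvCharOk_all c.toNat (List.mem_range.mpr (by omega))

theorem bc_step (m : Nat) :
    PySem.Int.bitCount (m : Int) = m % 2 + PySem.Int.bitCount ((m / 2 : Nat) : Int) := by
  rcases Nat.eq_zero_or_pos m with h | h
  · subst h; simp [PySem.Int.bitCount_zero]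
  · exact PySem.Int.bitCount_natCast h

theorem bc_split_nat (a b : Nat) (hb : b < 16) :
    PySem.Int.bitCount ((a * 16 + b : Nat) : Int) =
      PySem.Int.bitCount (a : Int) + PySem.Int.bitCount (b : Int) := by
  rw [bc_step (a * 16 + b), show (a * 16 + b) / 2 = a * 8 + b / 2 by omega,
      show (a * 16 + b) % 2 = b % 2 by omega,
      bc_step (a * 8 + b / 2), show (a * 8 + b / 2) / 2 = a * 4 + b / 4 by omega,
      show (a * 8 + b / 2) % 2 = b / 2 % 2 by omega,
      bc_step (a * 4 + b / 4), show (a * 4 + b / 4) / 2 = a * 2 + b / 8 by omega,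
      show (a * 4 + b / 4) % 2 = b / 4 % 2 by omega,
      bc_step (a * 2 + b / 8), show (a * 2 + b / 8) / 2 = a by omega,
      show (a * 2 + b / 8) % 2 = b / 8 % 2 by omega]
  have hB : PySem.Int.bitCount (b : Int) = b % 2 + (b / 2 % 2 + (b / 4 % 2 + b / 8 % 2)) := by
    interval_cases b <;> decide
  omega

theorem bc_split_int (n d : Int) (hn : 0 ≤ n) (hd0 : 0 ≤ d) (hd : d < 16) :
    PySem.Int.bitCount (16 * n + d) = PySem.Int.bitCount n + PySem.Int.bitCount d := by
  have h1 : (16 * n + d) = ((n.toNat * 16 + d.toNat : Nat) : Int) := by push_cast; omega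
  have h2 : n = ((n.toNat : Nat) : Int) := by omega
  have h3 : d = ((d.toNat : Nat) : Int) := by omega
  rw [h1, h2, h3]
  exact bc_split_nat n.toNat d.toNat (by omega)

theorem loop_eq (cs : List Char) (hcs : ∀ c ∈ cs, c.toNat ≤ 126) :
    ∀ n : Int, 0 ≤ n →
      pvALoop init_bitcount_dict (cs.map PySem.Chars.upperChar) (PySem.Int.bitCount n : Int) =
        pvBLoop cs n := by
  induction cs with
  | nil => intro n _; simp [pvALoop, pvBLoop]
  | cons c cs ih =>
    intro n hn
    have hok := pvCharOk_of_le c (hcs c (by simp))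
    unfold pvCharOk at hok
    rw [Bool.and_eq_true, beq_iff_eq, Char.ofNat_toNat] at hok
    obtain ⟨hget, hall⟩ := hok
    simp only [List.map_cons, pvALoop, pvBLoop]
    cases hv : pvHexVal? (c.toNat : Int) with
    | none => rw [hv] at hget; simp only [Option.map_none] at hget; rw [hget]
    | some d =>
      rw [hv] at hget hall
      simp only [Option.map_some] at hget
      simp only [Option.all_some, decide_eq_true_eq] at hall
      rw [hget]
      show pvALoop init_bitcount_dict (List.map PySem.Chars.upperChar cs)
            ((PySem.Int.bitCount n : Int) + (PySem.Int.bitCount d : Int)) = pvBLoop cs (16 * n + d)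
      have hstep : (PySem.Int.bitCount n : Int) + (PySem.Int.bitCount d : Int) =
          (PySem.Int.bitCount (16 * n + d) : Int) := by
        rw [bc_split_int n d hn hall.1 hall.2]; push_cast; ring
      rw [hstep]
      exact ih (fun x hx => hcs x (by simp [hx])) (16 * n + d) (by omega)

-- ===== VERDICT (by name: the statement is the Claim_ definition above) =====
theorem hex_bitcount_spec : Claim_equal_hex_bitcount := by
  intro text hdom
  unfold Spec_hex_bitcount hex_bitcount hex_bitcount_alt
  rw [PySem.Str.toList_upper]
  have hcs : ∀ c ∈ text.toList, c.toNat ≤ 126 := by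
    intro c hc
    have := List.all_eq_true.mp hdom c hc
    simp only [pvDomChar, Bool.or_eq_true, Bool.and_eq_true, decide_eq_true_eq, beq_iff_eq] at this
    omega
  have h0 : (0 : Int) = (PySem.Int.bitCount 0 : Int) := by decide
  rw [h0]
  exact loop_eq text.toList hcs 0 le_rfl
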